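-- pv_equiv track=rewrite | github.com/zouhaochen/Coursera_Python_Data_Visualization | week3/main.py | reconcile_countries_by_name
-- ===== SOURCE A (Python) =====
-- def reconcile_countries_by_name(plot_countries, gdp_countries):
--     "returns dictionary that has countryId and countryName touples which are not present in the gdp_countries"""
--     #initialising
--     dic = {}
--     lis = []
--     #iterating values
--     for keys in plot_countries:
--         for key in gdp_countries:
--             if plot_countries[keys] == key:
--                 dic[keys] = key
--     for keys in plot_countries:
--         if keys not in dic.keys():
--             lis.append(keys)
--     return dic, set(lis)
-- ===== SOURCE B (Python) =====
-- def reconcile_countries_by_name(plot_countries, gdp_countries):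
--     """Single pass: index gdp keys as a set, then classify each plot entry once."""
--     gdp_keys = set(gdp_countries)
--     dic = {}
--     unmatched = set()
--     for key, value in plot_countries.items():
--         if value in gdp_keys:
--             dic[key] = value
--         else:
--             unmatched.add(key)
--     return dic, unmatched
-- ===== Notes on version B (the rewrite author's own statement) =====
-- stated objective: faster
-- what changed: Replaces A's nested scan of gdp_countries for every plot key plus a second full pass over plot_countries with a one-time set of gdp keys and a single pass over plot_countries.items() that classifies each entry as matched or unmatched.
import Mathlib
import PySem

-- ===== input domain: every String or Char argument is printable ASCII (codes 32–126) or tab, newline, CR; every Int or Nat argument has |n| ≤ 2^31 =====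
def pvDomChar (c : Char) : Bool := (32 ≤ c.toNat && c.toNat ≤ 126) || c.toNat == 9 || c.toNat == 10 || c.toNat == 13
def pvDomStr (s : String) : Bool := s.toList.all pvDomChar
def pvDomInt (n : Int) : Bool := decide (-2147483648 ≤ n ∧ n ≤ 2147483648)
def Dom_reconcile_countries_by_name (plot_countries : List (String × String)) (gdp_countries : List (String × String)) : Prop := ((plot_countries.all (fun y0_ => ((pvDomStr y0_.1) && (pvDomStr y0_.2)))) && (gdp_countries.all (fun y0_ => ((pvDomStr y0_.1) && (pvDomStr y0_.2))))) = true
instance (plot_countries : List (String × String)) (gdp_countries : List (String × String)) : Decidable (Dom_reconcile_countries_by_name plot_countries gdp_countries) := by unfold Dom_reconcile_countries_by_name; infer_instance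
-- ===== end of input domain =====

-- B replaces A's nested scan of gdp_countries (and the second plot pass) by one set of
-- gdp keys and a single classifying pass over plot_countries: faster and simpler.


-- ===== PORT A =====
-- The two dict parameters arrive as association lists; `PySem.Dict.ofList` is Python's
-- dict() construction (later duplicate keys overwrite in place).
def reconcile_countries_by_name (plot_countries : List (String × String)) (gdp_countries : List (String × String)) : (List (String × String)) × List String :=
  let plot := PySem.Dict.ofList plot_countries
  let gdp := PySem.Dict.ofList gdp_countries
  -- dic = {}
  -- for keys in plot_countries: for key in gdp_countries: if plot_countries[keys] == key: dic[keys] = key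
  -- (plot_countries[keys] ported as getD keys ""; exact since keys ∈ plot.keys, so no KeyError)
  let dic := plot.keys.foldl (fun dic keys =>
      gdp.keys.foldl (fun dic key =>
        if plot.getD keys "" == key then dic.insert keys key else dic) dic)
    PySem.Dict.empty
  -- lis = []; for keys in plot_countries: if keys not in dic.keys(): lis.append(keys)
  let lis := plot.keys.foldl (fun lis keys =>
      if !(dic.contains keys) then lis ++ [keys] else lis) []
  (dic.items, PySem.Set.ofList lis)

-- ===== PORT B =====
def reconcile_countries_by_name_alt (plot_countries : List (String × String)) (gdp_countries : List (String × String)) : (List (String × String)) × List String :=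
  -- gdp_keys = set(gdp_countries)  (iterating a dict yields its keys)
  let gdp_keys := PySem.Set.ofList (PySem.Dict.ofList gdp_countries).keys
  -- one pass over plot_countries.items()
  let st := (PySem.Dict.ofList plot_countries).items.foldl
      (fun (st : PySem.Dict String String × PySem.Set String) p =>
        if gdp_keys.contains p.2 then (st.1.insert p.1 p.2, st.2)
        else (st.1, st.2.add p.1))
      (PySem.Dict.empty, PySem.Set.empty)
  (st.1.items, st.2)

-- ===== PRECONDITION & SPEC =====
def Spec_reconcile_countries_by_name (plot_countries : List (String × String)) (gdp_countries : List (String × String)) (out : (List (String × String)) × List String) : Prop := out = reconcile_countries_by_name_alt plot_countries gdp_countries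
instance (plot_countries : List (String × String)) (gdp_countries : List (String × String)) (out : (List (String × String)) × List String) : Decidable (Spec_reconcile_countries_by_name plot_countries gdp_countries out) := by unfold Spec_reconcile_countries_by_name; infer_instance

-- ===== CLAIM (what is proved, stated in full; the proofs are below) =====
def Claim_equal_reconcile_countries_by_name : Prop := ∀ (plot_countries : List (String × String)) (gdp_countries : List (String × String)), Dom_reconcile_countries_by_name plot_countries gdp_countries → Spec_reconcile_countries_by_name plot_countries gdp_countries (reconcile_countries_by_name plot_countries gdp_countries)

-- ===== LEMMAS AND PROOFS =====

-- A's inner scan over the (duplicate-free) gdp keys inserts v iff v occurs among them.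
theorem pv_inner_fold (g : List String) (d : PySem.Dict String String) (k v : String) :
    g.foldl (fun d key => if v == key then d.insert k key else d) d
      = if v ∈ g then d.insert k v else d := by
  induction g generalizing d with
  | nil => simp
  | cons x xs ih =>
    rw [List.foldl_cons]
    by_cases hx : v = x
    · subst hx
      rw [if_pos (by simp), ih]
      by_cases hm : v ∈ xs <;> simp [hm, PySem.Dict.insert_insert_self]
    · rw [if_neg (by simp [hx]), ih]
      simp [hx]

-- the dic-building fold over fresh, distinct keys appends exactly the matching items
theorem pv_dic_items (g : List String) (l : List (String × String))
    (d : PySem.Dict String String)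
    (hnd : (l.map Prod.fst).Nodup) (hfresh : ∀ p ∈ l, d.contains p.1 = false) :
    (l.foldl (fun d p => if p.2 ∈ g then d.insert p.1 p.2 else d) d).items
      = d.items ++ l.filter (fun p => decide (p.2 ∈ g)) := by
  induction l generalizing d with
  | nil => simp
  | cons p rest ih =>
    simp only [List.map_cons, List.nodup_cons] at hnd
    by_cases hg : p.2 ∈ g
    · have hc : d.contains p.1 = false := hfresh p (by simp)
      have := ih (d.insert p.1 p.2) hnd.2 (by
        intro q hq
        have hne : q.1 ≠ p.1 := by
          intro h
          exact hnd.1 (h ▸ List.mem_map_of_mem hq)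
        simp [PySem.Dict.contains_insert, hne, hfresh q (List.mem_cons_of_mem _ hq)])
      rw [List.foldl_cons, if_pos hg] at *
      simp only [List.filter_cons, decide_eq_true hg, this,
        PySem.Dict.items_insert_of_not_contains d p.2 hc]
      simp
    · have := ih d hnd.2 (fun q hq => hfresh q (List.mem_cons_of_mem _ hq))
      simp [hg, this]

-- keys of the resulting dic, and its contains test
theorem pv_dic_contains (g : List String) (l : List (String × String))
    (hnd : (l.map Prod.fst).Nodup) (p : String × String) (hp : p ∈ l) :
    (l.foldl (fun d q => if q.2 ∈ g then d.insert q.1 q.2 else d)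
        (PySem.Dict.empty : PySem.Dict String String)).contains p.1
      = decide (p.2 ∈ g) := by
  have hitems := pv_dic_items g l PySem.Dict.empty hnd (by intro q hq; rfl)
  have hkeys : (l.foldl (fun d q => if q.2 ∈ g then d.insert q.1 q.2 else d)
      (PySem.Dict.empty : PySem.Dict String String)).keys
      = (l.filter (fun p => decide (p.2 ∈ g))).map Prod.fst := by
    simp [PySem.Dict.keys, hitems, show (PySem.Dict.empty : PySem.Dict String String).items = [] from rfl]
  rw [PySem.Dict.contains_eq_decide_mem_keys, hkeys]
  by_cases hmem : p.2 ∈ g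
  · have hin : p.1 ∈ (l.filter (fun q => decide (q.2 ∈ g))).map Prod.fst :=
      List.mem_map_of_mem (List.mem_filter.mpr ⟨hp, decide_eq_true hmem⟩)
    simp [hin, hmem]
  · have hnot : p.1 ∉ (l.filter (fun q => decide (q.2 ∈ g))).map Prod.fst := by
      intro hm
      rcases List.mem_map.mp hm with ⟨q, hqf, hq1⟩
      have hql := List.mem_of_mem_filter hqf
      have hq : q = p := List.inj_on_of_nodup_map hnd hql hp hq1
      subst hq
      have := List.of_mem_filter hqf
      exact hmem (by simpa using this)
    simp [hnot, hmem]

-- B's paired fold splits into two independent folds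
theorem pv_pair_fold (c : String × String → Bool) (l : List (String × String))
    (d : PySem.Dict String String) (s : PySem.Set String) :
    l.foldl (fun (st : PySem.Dict String String × PySem.Set String) p =>
        if c p then (st.1.insert p.1 p.2, st.2) else (st.1, st.2.add p.1)) (d, s)
      = (l.foldl (fun d p => if c p then d.insert p.1 p.2 else d) d,
         l.foldl (fun s p => if c p then s else s.add p.1) s) := by
  induction l generalizing d s with
  | nil => rfl
  | cons p rest ih =>
    by_cases hc : c p <;> simp [hc, ih]

-- the unmatched fold over fresh distinct keys appends
theorem pv_set_fold (c : String × String → Bool) (l : List (String × String))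
    (s : PySem.Set String) (hfresh : ∀ p ∈ l, p.1 ∉ s)
    (hnd : (l.map Prod.fst).Nodup) :
    l.foldl (fun s p => if c p then s else s.add p.1) s
      = s ++ (l.filter (fun p => !(c p))).map Prod.fst := by
  induction l generalizing s with
  | nil => simp
  | cons p rest ih =>
    simp only [List.map_cons, List.nodup_cons] at hnd
    by_cases hc : c p
    · rw [List.foldl_cons, if_pos hc,
          ih s (fun q hq => hfresh q (List.mem_cons_of_mem _ hq)) hnd.2]
      simp [hc]
    · rw [List.foldl_cons, if_neg hc, PySem.Set.add_of_not_mem (hfresh p (by simp)),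
          ih (s ++ [p.1]) ?_ hnd.2]
      · simp [hc]
      · intro q hq hmem
        rcases List.mem_append.mp hmem with h | h
        · exact hfresh q (List.mem_cons_of_mem _ hq) h
        · simp only [List.mem_singleton] at h
          exact hnd.1 (h ▸ List.mem_map_of_mem hq)

-- ===== VERDICT (by name: the statement is the Claim_ definition above) =====
theorem reconcile_countries_by_name_spec : Claim_equal_reconcile_countries_by_name := by
  intro plot_countries gdp_countries _
  unfold Spec_reconcile_countries_by_name reconcile_countries_by_name reconcile_countries_by_name_alt
  set plot := PySem.Dict.ofList plot_countries with hplot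
  set gdp := PySem.Dict.ofList gdp_countries with hgdp
  have hndp : plot.keys.Nodup := PySem.Dict.nodup_keys_ofList _
  have hndg : gdp.keys.Nodup := PySem.Dict.nodup_keys_ofList _
  have hkeys : plot.keys = plot.items.map Prod.fst := rfl
  have hndi : (plot.items.map Prod.fst).Nodup := hkeys ▸ hndp
  have hgset : PySem.Set.ofList gdp.keys = gdp.keys :=
    PySem.Set.ofList_eq_self_of_nodup _ hndg
  -- align A's dic fold with the canonical fold over items
  have hgetD : ∀ p ∈ plot.items, plot.getD p.1 "" = p.2 := by
    intro p hp
    exact PySem.Dict.getD_of_mem_items _ hp hndp ""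
  have hA : plot.keys.foldl (fun dic keys =>
        gdp.keys.foldl (fun dic key =>
          if plot.getD keys "" == key then dic.insert keys key else dic) dic)
        PySem.Dict.empty
      = plot.items.foldl (fun d p => if p.2 ∈ gdp.keys then d.insert p.1 p.2 else d)
        PySem.Dict.empty := by
    rw [hkeys, List.foldl_map]
    apply PySem.List.foldl_congr_mem
    intro d p hp
    rw [hgetD p hp] at *
    exact pv_inner_fold gdp.keys d p.1 p.2
  -- B's contains test on the set of gdp keys is list membership
  have hcB : ∀ p : String × String,
      (PySem.Set.ofList gdp.keys).contains p.2 = decide (p.2 ∈ gdp.keys) := by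
    intro p
    rw [hgset]
    simp [PySem.Set.contains_eq_listContains]
  have hBfold := pv_pair_fold (fun p => (PySem.Set.ofList gdp.keys).contains p.2)
      plot.items PySem.Dict.empty PySem.Set.empty
  have hcongr : plot.items.foldl
        (fun d p => if (PySem.Set.ofList gdp.keys).contains p.2 then d.insert p.1 p.2 else d)
        PySem.Dict.empty
      = plot.items.foldl (fun d p => if p.2 ∈ gdp.keys then d.insert p.1 p.2 else d)
        PySem.Dict.empty := by
    apply PySem.List.foldl_congr_mem
    intro d p _
    rw [hcB]
    by_cases h : p.2 ∈ gdp.keys <;> simp [h]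
  -- second components
  set dicA := plot.items.foldl (fun d p => if p.2 ∈ gdp.keys then d.insert p.1 p.2 else d)
      (PySem.Dict.empty : PySem.Dict String String) with hdicA
  have hlis : plot.keys.foldl (fun lis keys =>
        if !(dicA.contains keys) then lis ++ [keys] else lis) []
      = (plot.items.filter (fun p => !(decide (p.2 ∈ gdp.keys)))).map Prod.fst := by
    rw [hkeys, List.foldl_map]
    have : plot.items.foldl (fun lis p =>
          if !(dicA.contains p.1) then lis ++ [p.1] else lis) ([] : List String)
        = plot.items.foldl (fun lis p =>
          if !(decide (p.2 ∈ gdp.keys)) then lis ++ [p.1] else lis) [] := by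
      apply PySem.List.foldl_congr_mem
      intro acc p hp
      rw [hdicA, pv_dic_contains gdp.keys plot.items hndi p hp]
    rw [this, PySem.List.foldl_append_if (fun p => !(decide (p.2 ∈ gdp.keys))) Prod.fst]
    simp
  have hsetB : plot.items.foldl (fun s p =>
        if (PySem.Set.ofList gdp.keys).contains p.2 then s else s.add p.1)
        (PySem.Set.empty : PySem.Set String)
      = (plot.items.filter (fun p => !(decide (p.2 ∈ gdp.keys)))).map Prod.fst := by
    rw [pv_set_fold _ _ _ (by intro q hq h; simp [PySem.Set.empty] at h) hndi]
    have : plot.items.filter (fun p => !((PySem.Set.ofList gdp.keys).contains p.2))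
        = plot.items.filter (fun p => !(decide (p.2 ∈ gdp.keys))) := by
      apply List.filter_congr
      intro p _
      rw [hcB]
    rw [this]
    simp [PySem.Set.empty]
  have hlisnd : ((plot.items.filter (fun p => !(decide (p.2 ∈ gdp.keys)))).map Prod.fst).Nodup :=
    hndi.sublist (List.Sublist.map Prod.fst (List.filter_sublist ..))
  simp only [hA, hBfold, hcongr, hlis, hsetB]
  refine Prod.ext rfl ?_
  simp [PySem.Set.ofList_eq_self_of_nodup _ hlisnd]
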